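-- pv_equiv track=rewrite | github.com/AP-MI-2021/lab-4-ClaudiuDC21 | main.py | get_lists_with_reverse_on_div_elements
-- ===== SOURCE A (Python) =====
-- from typing import List
--
-- def get_reverse(n: int) -> int:
--     '''
--     Determina inversul unui numar n.
--     :param n: numarul dat
--     :return: inversul numarului
--     '''
--     invers = 0
--     while n:
--         invers = invers * 10 + n % 10
--         n = n // 10
--     return invers
--
-- def get_lists_with_reverse_on_div_elements(lst1: List[int], lst2: List[int], lst3:List[int]) -> tuple:
--     '''
--     Determina listele obținute prin înlocuirea în cele două liste citite la punctul 1 a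
-- tuturor elementelor cu oglinditul lor dacă îndeplinesc următoarea regulă: elementele sunt divizibile
-- cu toate elementele din a treia lista.
--     :param lst1:Prima lista data.
--     :param lst2:A doua lista data.
--     :param lst3:A treia lista cu care se vor compara primele 2.
--     :return: 2 liste cu elemente prelucrte.
--     '''
--     lst1_prelucrat = []
--     lst2_prelucrat = []
--     for num in lst1:
--         work = 1
--         for div in lst3:
--             if num % div != 0:
--                 work = 0
--         if work == 1:
--             lst1_prelucrat.append(int(get_reverse(num)))
--         else:
--             lst1_prelucrat.append(int(num))
--     for num in lst2:
--         work = 1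
--         for div in lst3:
--             if num % div != 0:
--                 work = 0
--         if work == 1:
--             lst2_prelucrat.append(int(get_reverse(num)))
--         else:
--             lst2_prelucrat.append(int(num))
--     return lst1_prelucrat, lst2_prelucrat
-- ===== SOURCE B (Python) =====
-- def _gcd(a, b):
--     while b:
--         a, b = b, a % b
--     return a
--
--
-- def _rev(n):
--     r = 0
--     while n > 0:
--         r = r * 10 + n % 10
--         n //= 10
--     return r
--
--
-- def get_lists_with_reverse_on_div_elements(lst1, lst2, lst3):
--     # Precompute the LCM of lst3 once: num is divisible by every element of
--     # lst3 iff num is divisible by that LCM, so each element needs one modulo.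
--     l = 1
--     for d in lst3:
--         d = abs(d)
--         l = l * d // _gcd(l, d)
--     out1 = [_rev(num) if num % l == 0 else num for num in lst1]
--     out2 = [_rev(num) if num % l == 0 else num for num in lst2]
--     return out1, out2
-- ===== Notes on version B (the rewrite author's own statement) =====
-- stated objective: faster
-- what changed: B precomputes the LCM of lst3 once (hand-rolled Euclid gcd) and tests each element of lst1/lst2 with a single modulo, instead of A's inner scan over lst3 for every element; the digit-reversal loop runs only for positive n.
import Mathlib
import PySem

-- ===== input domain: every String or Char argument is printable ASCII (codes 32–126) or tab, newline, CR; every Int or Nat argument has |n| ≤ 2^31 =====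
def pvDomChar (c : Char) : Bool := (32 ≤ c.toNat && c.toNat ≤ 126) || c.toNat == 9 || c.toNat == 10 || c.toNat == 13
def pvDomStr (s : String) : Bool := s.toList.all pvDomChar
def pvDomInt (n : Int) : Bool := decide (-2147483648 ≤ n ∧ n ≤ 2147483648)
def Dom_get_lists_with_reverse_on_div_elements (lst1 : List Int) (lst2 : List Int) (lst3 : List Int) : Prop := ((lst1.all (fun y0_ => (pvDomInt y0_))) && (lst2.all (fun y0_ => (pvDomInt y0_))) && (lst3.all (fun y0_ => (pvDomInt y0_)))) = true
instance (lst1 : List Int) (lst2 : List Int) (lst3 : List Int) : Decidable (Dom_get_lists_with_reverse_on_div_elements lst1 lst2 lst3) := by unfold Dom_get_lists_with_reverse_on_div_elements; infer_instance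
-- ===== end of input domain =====

-- B precomputes the LCM of lst3 once and tests each element with a single modulo
-- instead of A's inner scan over lst3 per element (objective: faster, asymptotic).


-- ===== PORT A =====
-- A's 'while n:' loop, with fuel: fuel 64 covers every n the loop is reached with
-- inside Pre_ (there 0 ≤ n and, on Dom, n has at most 10 decimal digits; on negative
-- n the Python loop never terminates — such inputs are outside Pre_).
def get_reverse_loop : Nat → Int → Int → Int
  | 0, invers, _ => invers
  | f + 1, invers, n =>
    if n ≠ 0 then get_reverse_loop f (invers * 10 + PySem.Int.mod n 10) (PySem.Int.floordiv n 10)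
    else invers

def get_reverse (n : Int) : Int := get_reverse_loop 64 0 n

-- the inner 'work' flag loop over lst3
def pvWork (lst3 : List Int) (num : Int) : Int :=
  lst3.foldl (fun work div => if PySem.Int.mod num div ≠ 0 then 0 else work) 1

-- one of A's two identical append loops (int(...) on an int is the identity)
def pvProcess (lst3 : List Int) (lst : List Int) : List Int :=
  lst.foldl (fun acc num => acc ++ [if pvWork lst3 num = 1 then get_reverse num else num]) []

def get_lists_with_reverse_on_div_elements (lst1 : List Int) (lst2 : List Int) (lst3 : List Int) : List Int × List Int :=
  (pvProcess lst3 lst1, pvProcess lst3 lst2)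

-- ===== PORT B =====
-- Source B's hand-written Euclid '_gcd' (its arguments are always nonnegative ints,
-- where Python's % coincides with Nat.%)
def bgcd : Nat → Nat → Nat
  | a, 0 => a
  | a, b + 1 => bgcd (b + 1) (a % (b + 1))
termination_by _ b => b
decreasing_by exact Nat.mod_lt _ (by omega)

-- Source B's '_rev' loop; it runs only while n > 0, where Python's % and // on ints
-- coincide with Nat's % and /, and returns r unchanged for n ≤ 0 (toNat n = 0 there)
def brevLoop (r n : Nat) : Nat :=
  if 0 < n then brevLoop (r * 10 + n % 10) (n / 10) else r
termination_by n
decreasing_by exact Nat.div_lt_self (by omega) (by omega)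

def brev (n : Int) : Int := Int.ofNat (brevLoop 0 n.toNat)

-- Source B's LCM accumulation loop (l and abs(d) are nonnegative, so Python's * and //
-- coincide with Nat's * and /)
def blcmAcc (lst3 : List Int) : Nat :=
  lst3.foldl (fun l d => l * d.natAbs / bgcd l d.natAbs) 1

def get_lists_with_reverse_on_div_elements_alt (lst1 : List Int) (lst2 : List Int) (lst3 : List Int) : List Int × List Int :=
  let l : Int := Int.ofNat (blcmAcc lst3)
  (lst1.map (fun num => if PySem.Int.mod num l = 0 then brev num else num),
   lst2.map (fun num => if PySem.Int.mod num l = 0 then brev num else num))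

-- ===== PRECONDITION & SPEC =====
-- Pre_ excludes exactly the inputs on which Python A does not return normally:
-- 0 ∈ lst3 makes 'num % div' raise ZeroDivisionError, and a negative element of
-- lst1/lst2 divisible by every element of lst3 sends get_reverse into an
-- infinite loop ('n // 10' never reaches 0 from below).
def Pre_get_lists_with_reverse_on_div_elements (lst1 : List Int) (lst2 : List Int) (lst3 : List Int) : Prop :=
  (0 : Int) ∉ lst3 ∧
  (∀ x ∈ lst1, x < 0 → ¬ (∀ d ∈ lst3, d ∣ x)) ∧
  (∀ x ∈ lst2, x < 0 → ¬ (∀ d ∈ lst3, d ∣ x))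
instance (lst1 : List Int) (lst2 : List Int) (lst3 : List Int) : Decidable (Pre_get_lists_with_reverse_on_div_elements lst1 lst2 lst3) := by unfold Pre_get_lists_with_reverse_on_div_elements; infer_instance

def pvWitness_get_lists_with_reverse_on_div_elements : List Int × List Int × List Int := ([12, 7, -5], [6, 36], [2, 3])

def Spec_get_lists_with_reverse_on_div_elements (lst1 : List Int) (lst2 : List Int) (lst3 : List Int) (out : List Int × List Int) : Prop := out = get_lists_with_reverse_on_div_elements_alt lst1 lst2 lst3
instance (lst1 : List Int) (lst2 : List Int) (lst3 : List Int) (out : List Int × List Int) : Decidable (Spec_get_lists_with_reverse_on_div_elements lst1 lst2 lst3 out) := by unfold Spec_get_lists_with_reverse_on_div_elements; infer_instance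

-- ===== CLAIM (what is proved, stated in full; the proofs are below) =====
def Claim_equal_get_lists_with_reverse_on_div_elements : Prop := ∀ (lst1 : List Int) (lst2 : List Int) (lst3 : List Int), Dom_get_lists_with_reverse_on_div_elements lst1 lst2 lst3 → Pre_get_lists_with_reverse_on_div_elements lst1 lst2 lst3 → Spec_get_lists_with_reverse_on_div_elements lst1 lst2 lst3 (get_lists_with_reverse_on_div_elements lst1 lst2 lst3)

-- ===== LEMMAS AND PROOFS =====

-- Source B's Euclid is Nat.gcd with swapped arguments
lemma bgcd_eq (a b : Nat) : bgcd a b = Nat.gcd b a := by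
  induction b using Nat.strong_induction_on generalizing a with
  | _ b ih =>
    cases b with
    | zero => simp [bgcd]
    | succ m =>
      rw [show bgcd a (m + 1) = bgcd (m + 1) (a % (m + 1)) from by simp [bgcd],
        ih (a % (m + 1)) (Nat.mod_lt _ (by omega)) (m + 1)]
      exact (Nat.gcd_rec _ _).symm

-- the accumulated value is a fold of Nat.lcm
lemma blcmAcc_eq (lst3 : List Int) :
    blcmAcc lst3 = lst3.foldl (fun l d => Nat.lcm l d.natAbs) 1 := by
  unfold blcmAcc
  congr 1
  funext l d
  rw [bgcd_eq, Nat.gcd_comm, Nat.lcm]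

-- divisibility by the folded lcm = divisibility by the accumulator and every element
lemma fold_lcm_dvd (lst3 : List Int) (acc : Nat) (num : Int) :
    ((lst3.foldl (fun l d => Nat.lcm l d.natAbs) acc : Nat) : Int) ∣ num ↔
      ((acc : Int) ∣ num ∧ ∀ d ∈ lst3, d ∣ num) := by
  induction lst3 generalizing acc with
  | nil => simp
  | cons d ds ih =>
    simp only [List.foldl_cons, ih, List.mem_cons]
    rw [Int.natCast_dvd, Int.natCast_dvd, Nat.lcm_dvd_iff]
    constructor
    · rintro ⟨⟨h1, h2⟩, h3⟩
      refine ⟨h1, ?_⟩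
      rintro e (rfl | he)
      · exact (Int.natAbs_dvd_natAbs).1 h2
      · exact h3 e he
    · rintro ⟨h1, h2⟩
      exact ⟨⟨h1, (Int.natAbs_dvd_natAbs).2 (h2 d (Or.inl rfl))⟩, fun e he => h2 e (Or.inr he)⟩

-- A's work flag is 1 iff every element of lst3 divides num
lemma workFold_zero (l : List Int) (num : Int) :
    l.foldl (fun work div => if PySem.Int.mod num div ≠ 0 then 0 else work) (0 : Int) = 0 := by
  induction l with
  | nil => rfl
  | cons d ds ih => simp only [List.foldl_cons]; split <;> exact ih

lemma pvWork_eq (lst3 : List Int) (num : Int) :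
    pvWork lst3 num = if ∀ d ∈ lst3, d ∣ num then 1 else 0 := by
  induction lst3 with
  | nil => simp [pvWork]
  | cons d ds ih =>
    unfold pvWork at ih ⊢
    simp only [List.foldl_cons]
    by_cases hd : d ∣ num
    · have : PySem.Int.mod num d = 0 := (PySem.Int.mod_eq_zero_iff_dvd num d).2 hd
      rw [if_neg (by simp [this]), ih]
      by_cases hall : ∀ e ∈ ds, e ∣ num
      · rw [if_pos hall, if_pos (by simpa [hd] using hall)]
      · rw [if_neg hall, if_neg (by simp [hd, hall])]
    · have : PySem.Int.mod num d ≠ 0 := fun h => hd ((PySem.Int.mod_eq_zero_iff_dvd num d).1 h)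
      rw [if_pos this, workFold_zero]
      rw [if_neg (by simp [hd])]

-- A's fueled reverse loop agrees with Source B's reverse loop on nonnegative input
lemma rev_loop_agree (f : Nat) (r n : Nat) (h : n < 10 ^ f) :
    get_reverse_loop f (r : Int) (n : Int) = ((brevLoop r n : Nat) : Int) := by
  induction f generalizing r n with
  | zero =>
    have hn : n = 0 := by simpa using h
    subst hn
    rw [get_reverse_loop, brevLoop]
    simp
  | succ f ih =>
    rw [brevLoop]
    by_cases hn : n = 0
    · subst hn; simp [get_reverse_loop]
    · rw [get_reverse_loop, if_pos (by exact_mod_cast hn), if_pos (by omega)]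
      have hm : PySem.Int.mod (n : Int) (10 : Int) = ((n % 10 : Nat) : Int) := by
        exact_mod_cast PySem.Int.mod_natCast n 10
      have hd : PySem.Int.floordiv (n : Int) (10 : Int) = ((n / 10 : Nat) : Int) := by
        exact_mod_cast PySem.Int.floordiv_natCast n 10
      rw [hm, hd]
      have : (r : Int) * 10 + ((n % 10 : Nat) : Int) = ((r * 10 + n % 10 : Nat) : Int) := by
        push_cast; ring
      rw [this]
      exact ih _ _ (by
        have : n < 10 ^ f * 10 := by rw [← pow_succ]; exact h
        omega)

lemma get_reverse_eq_brev (num : Int) (h0 : 0 ≤ num) (hb : num ≤ 2147483648) :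
    get_reverse num = brev num := by
  have hcast : ((num.toNat : Nat) : Int) = num := Int.toNat_of_nonneg h0
  have hlt : num.toNat < 10 ^ 64 := by
    have : num.toNat ≤ 2147483648 := by omega
    calc num.toNat ≤ 2147483648 := this
      _ < 10 ^ 64 := by norm_num
  unfold get_reverse brev
  have := rev_loop_agree 64 0 num.toNat hlt
  rw [Nat.cast_zero, hcast] at this
  exact this

-- per-list equality, under the per-list part of Pre_ and Dom
lemma process_eq (lst3 lst : List Int)
    (hneg : ∀ x ∈ lst, x < 0 → ¬ (∀ d ∈ lst3, d ∣ x))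
    (hdom : ∀ x ∈ lst, pvDomInt x = true) :
    pvProcess lst3 lst =
      lst.map (fun num => if PySem.Int.mod num ((blcmAcc lst3 : Nat) : Int) = 0 then brev num else num) := by
  unfold pvProcess
  rw [PySem.List.foldl_append_singleton_eq_map]
  apply List.map_congr_left
  intro num hmem
  have hdvd : PySem.Int.mod num ((blcmAcc lst3 : Nat) : Int) = 0 ↔ ∀ d ∈ lst3, d ∣ num := by
    rw [PySem.Int.mod_eq_zero_iff_dvd, blcmAcc_eq, fold_lcm_dvd]
    simp
  rw [pvWork_eq]
  by_cases hall : ∀ d ∈ lst3, d ∣ num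
  · rw [if_pos hall, if_pos (hdvd.2 hall)]
    have hnn : 0 ≤ num := by
      by_contra hlt
      exact hneg num hmem (by omega) hall
    have hd := hdom num hmem
    simp only [pvDomInt, decide_eq_true_eq] at hd
    exact get_reverse_eq_brev num hnn hd.2
  · rw [if_neg (by simpa using hall), if_neg (fun h => hall (hdvd.1 h))]

-- ===== VERDICT (by name: the statement is the Claim_ definition above) =====
theorem get_lists_with_reverse_on_div_elements_spec : Claim_equal_get_lists_with_reverse_on_div_elements := by
  intro lst1 lst2 lst3 hdom hpre
  obtain ⟨h0, h1, h2⟩ := hpre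
  unfold Dom_get_lists_with_reverse_on_div_elements at hdom
  simp only [Bool.and_eq_true, List.all_eq_true] at hdom
  unfold Spec_get_lists_with_reverse_on_div_elements
  unfold get_lists_with_reverse_on_div_elements get_lists_with_reverse_on_div_elements_alt
  simp only [Int.ofNat_eq_natCast]
  rw [process_eq lst3 lst1 h1 hdom.1.1, process_eq lst3 lst2 h2 hdom.1.2]
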